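-- pv_equiv track=rewrite | github.com/domeng/PScodes | Practice/srm_504_5_easy_TheNumbersWithLuckyLastDigit.py | find
-- ===== SOURCE A (Python) =====
-- def find(n):
--   best = -1
--   for i in range(11):
--     for j in range(11):
--       if i == 0 and j == 0:
--         continue
--       num = i*4 + j*7
--       if num > n or num%10 != n%10:
--         continue
--       if best < 0 or i+j < best:
--         best = i+j
--   return best
-- ===== SOURCE B (Python) =====
-- def find(n):
--     # Search by increasing total count of addends instead of scanning the whole
--     # 11x11 grid: the first achievable count is the minimum.
--     r = n % 10
--     for c in range(1, 21):
--         for b in range(0, min(c, 10) + 1):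
--             a = c - b
--             if a <= 10:
--                 s = 4 * a + 7 * b
--                 if s <= n and s % 10 == r:
--                     return c
--     return -1
-- ===== Notes on version B (the rewrite author's own statement) =====
-- stated objective: alternative
-- what changed: Replaces the full 11x11 grid scan that tracks the minimum i+j with an early-returning search over ascending total counts c=1..20, trying each split into fours/sevens and returning the first achievable count.
import Mathlib
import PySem

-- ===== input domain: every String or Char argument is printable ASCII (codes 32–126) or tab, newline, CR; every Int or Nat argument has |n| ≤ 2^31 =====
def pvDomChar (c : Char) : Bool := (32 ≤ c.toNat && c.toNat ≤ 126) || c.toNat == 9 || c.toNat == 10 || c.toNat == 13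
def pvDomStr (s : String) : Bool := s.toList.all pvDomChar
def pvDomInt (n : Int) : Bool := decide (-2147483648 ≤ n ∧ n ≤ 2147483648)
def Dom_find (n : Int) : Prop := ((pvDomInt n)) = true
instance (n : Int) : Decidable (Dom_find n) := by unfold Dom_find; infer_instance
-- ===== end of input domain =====

-- B replaces A's full 11x11 grid scan tracking the minimum i+j with an early-returning
-- search over ascending total counts (objective: alternative decomposition, same cost class).


-- ===== PORT A =====
def find (n : Int) : Int :=
  (PySem.List.pyRange 0 11 1).foldl (fun best i =>
    (PySem.List.pyRange 0 11 1).foldl (fun best j =>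
      if i = 0 ∧ j = 0 then best
      else
        let num := i * 4 + j * 7
        if num > n ∨ PySem.Int.mod num 10 ≠ PySem.Int.mod n 10 then best
        else if best < 0 ∨ i + j < best then i + j else best) best) (-1)

-- ===== PORT B =====
def find_alt (n : Int) : Int :=
  let r := PySem.Int.mod n 10
  match (PySem.List.pyRange 1 21 1).findSome? (fun c =>
      (PySem.List.pyRange 0 (min c 10 + 1) 1).findSome? (fun b =>
        let a := c - b
        if a ≤ 10 then
          let s := 4 * a + 7 * b
          if s ≤ n ∧ PySem.Int.mod s 10 = r then some c else none
        else none)) with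
  | some c => c
  | none => -1

-- ===== PRECONDITION & SPEC =====
def Spec_find (n : Int) (out : Int) : Prop := out = find_alt n
instance (n : Int) (out : Int) : Decidable (Spec_find n out) := by unfold Spec_find; infer_instance

-- ===== CLAIM (what is proved, stated in full; the proofs are below) =====
def Claim_equal_find : Prop := ∀ (n : Int), Dom_find n → Spec_find n (find n)

-- ===== LEMMAS AND PROOFS =====

-- Both programs look at n only through n % 10 and through 's ≤ n' for sums s ∈ [0, 110].
theorem pv_findSome?_congr {α β : Type} (l : List α) (f g : α → Option β)
    (h : ∀ x ∈ l, f x = g x) : l.findSome? f = l.findSome? g := by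
  induction l with
  | nil => rfl
  | cons a t ih =>
    simp only [List.findSome?_cons, h a (by simp)]
    cases g a with
    | none => exact ih (fun x hx => h x (by simp [hx]))
    | some b => rfl

theorem find_congr (n m : Int)
    (h10 : PySem.Int.mod n 10 = PySem.Int.mod m 10)
    (hle : ∀ s : Int, 0 ≤ s → s ≤ 110 → (s ≤ n ↔ s ≤ m)) :
    find n = find m := by
  unfold find
  apply PySem.List.foldl_congr_mem
  intro acc i hi
  apply PySem.List.foldl_congr_mem
  intro acc' j hj
  rw [PySem.List.mem_pyRange_one] at hi hj
  have hnum : (n < i * 4 + j * 7) ↔ (m < i * 4 + j * 7) := by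
    have := hle (i * 4 + j * 7) (by omega) (by omega)
    omega
  simp only [h10, hnum]

theorem find_alt_congr (n m : Int)
    (h10 : PySem.Int.mod n 10 = PySem.Int.mod m 10)
    (hle : ∀ s : Int, 0 ≤ s → s ≤ 110 → (s ≤ n ↔ s ≤ m)) :
    find_alt n = find_alt m := by
  unfold find_alt
  rw [h10]
  have : ∀ c ∈ PySem.List.pyRange 1 21 1,
      (PySem.List.pyRange 0 (min c 10 + 1) 1).findSome? (fun b =>
        let a := c - b
        if a ≤ 10 then
          let s := 4 * a + 7 * b
          if s ≤ n ∧ PySem.Int.mod s 10 = PySem.Int.mod m 10 then some c else none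
        else none)
      = (PySem.List.pyRange 0 (min c 10 + 1) 1).findSome? (fun b =>
        let a := c - b
        if a ≤ 10 then
          let s := 4 * a + 7 * b
          if s ≤ m ∧ PySem.Int.mod s 10 = PySem.Int.mod m 10 then some c else none
        else none) := by
    intro c hc
    apply pv_findSome?_congr
    intro b hb
    rw [PySem.List.mem_pyRange_one] at hc hb
    have hblt : b ≤ min c 10 := by omega
    by_cases ha : c - b ≤ 10
    · have hs : (4 * (c - b) + 7 * b ≤ n) ↔ (4 * (c - b) + 7 * b ≤ m) := by
        have := hle (4 * (c - b) + 7 * b) (by omega) (by omega)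
        omega
      simp only [hs]
    · simp only [ha, if_false]
  exact congrArg (fun o => match o with | some c => c | none => (-1 : Int))
    (pv_findSome?_congr _ _ _ this)

-- canonical representative in [-10, 119] with the same answer
def pvCanon (n : Int) : Int :=
  if n < 0 then PySem.Int.mod n 10 - 10
  else if n ≤ 119 then n else 110 + PySem.Int.mod n 10

theorem pvCanon_mod (n : Int) : PySem.Int.mod n 10 = PySem.Int.mod (pvCanon n) 10 := by
  unfold pvCanon
  simp only [PySem.Int.mod_eq_emod_of_pos (by omega : (0:Int) < 10)]
  split_ifs with h1 h2 <;> omega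

theorem pvCanon_le (n : Int) : ∀ s : Int, 0 ≤ s → s ≤ 110 → (s ≤ n ↔ s ≤ pvCanon n) := by
  intro s hs0 hs1
  unfold pvCanon
  simp only [PySem.Int.mod_eq_emod_of_pos (by omega : (0:Int) < 10)]
  split_ifs with h1 h2 <;> omega

theorem pvCanon_bounds (n : Int) : -10 ≤ pvCanon n ∧ pvCanon n ≤ 119 := by
  unfold pvCanon
  simp only [PySem.Int.mod_eq_emod_of_pos (by omega : (0:Int) < 10)]
  split_ifs with h1 h2 <;> omega

set_option maxRecDepth 100000 in
set_option maxHeartbeats 2000000 in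
theorem pv_small : ∀ k : Nat, k < 130 → find ((k : Int) - 10) = find_alt ((k : Int) - 10) := by
  decide

-- ===== VERDICT (by name: the statement is the Claim_ definition above) =====
theorem find_spec : Claim_equal_find := by
  intro n _
  unfold Spec_find
  rw [find_congr n (pvCanon n) (pvCanon_mod n) (pvCanon_le n),
      find_alt_congr n (pvCanon n) (pvCanon_mod n) (pvCanon_le n)]
  obtain ⟨hlo, hhi⟩ := pvCanon_bounds n
  have hk : pvCanon n = ((pvCanon n + 10).toNat : Int) - 10 := by omega
  rw [hk]
  exact pv_small (pvCanon n + 10).toNat (by omega)
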